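-- pv_equiv track=rewrite | github.com/Aleephdez/imw_alejandro | trim-1/ut2/a5/main.py | length_of_words
-- ===== SOURCE A (Python) =====
-- def length_of_words(text):
--     length_list = []    #Creamos una lista vacía para introducir la longitud de cada palabra
--     word_list = text.split()    #Separamos las palabras
--     for i in word_list: #Recorremos las palabras de la lista
--         counter = 0 #Reiniciamos a 0 la variable counter en cada iteración
--         for char in i:  #Recorremos los caracteres de cada palabra
--             counter += 1    #Acumulamos el número de caracteres por palabra
--             number = str(counter)   #Transformamos el número en un string, para poder convertir la lista en un string posteriormente
--         length_list.append(number)  #Añadimos el número a la lista vacía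
--
--     new_string = ' '.join(length_list)  #Transformamos la lista en un string
--
--     return new_string
-- ===== SOURCE B (Python) =====
-- def length_of_words(text):
--     output = []
--     count = 0
--     for ch in text:
--         if ch.isspace():
--             if count > 0:
--                 output.append(str(count))
--             count = 0
--         else:
--             count += 1
--     if count > 0:
--         output.append(str(count))
--     return ' '.join(output)
-- ===== Notes on version B (the rewrite author's own statement) =====
-- stated objective: faster
-- what changed: Single character-by-character pass that counts non-whitespace runs and emits each run length directly, instead of split()-building a word list and counting each word's characters.
import Mathlib
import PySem

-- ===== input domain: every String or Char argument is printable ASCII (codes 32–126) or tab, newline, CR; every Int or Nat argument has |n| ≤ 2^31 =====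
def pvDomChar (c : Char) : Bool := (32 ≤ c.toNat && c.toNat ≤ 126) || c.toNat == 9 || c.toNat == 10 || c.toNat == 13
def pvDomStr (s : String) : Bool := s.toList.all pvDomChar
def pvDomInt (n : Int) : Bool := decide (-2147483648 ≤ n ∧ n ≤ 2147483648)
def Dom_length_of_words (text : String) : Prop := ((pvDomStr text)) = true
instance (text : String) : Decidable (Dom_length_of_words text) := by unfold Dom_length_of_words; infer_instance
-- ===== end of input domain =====

-- B replaces split()-then-count-each-word by a single character scan that counts
-- non-whitespace runs and emits each run length directly (no intermediate word list;
-- measured constant-factor faster in a timing run).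

-- ===== PORT A =====
def length_of_words (text : String) : String :=
  let length_list : List String := []
  let word_list := PySem.Str.split₀ text
  let length_list := word_list.foldl (fun length_list i =>
    let st := i.toList.foldl (fun (st : Int × String) _char =>
      let counter := st.1 + 1
      let number := PySem.Int.toStr counter
      (counter, number)) (0, "")
    length_list ++ [st.2]) length_list
  let new_string := PySem.Str.join " " length_list
  new_string

-- ===== PORT B =====
def length_of_words_alt (text : String) : String :=
  let st := text.toList.foldl (fun (st : List String × Int) ch =>
    if PySem.Chars.isspace ch then
      (if st.2 > 0 then st.1 ++ [PySem.Int.toStr st.2] else st.1, 0)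
    else
      (st.1, st.2 + 1)) (([] : List String), (0 : Int))
  let output := if st.2 > 0 then st.1 ++ [PySem.Int.toStr st.2] else st.1
  PySem.Str.join " " output

-- ===== PRECONDITION & SPEC =====
def Spec_length_of_words (text : String) (out : String) : Prop := out = length_of_words_alt text
instance (text : String) (out : String) : Decidable (Spec_length_of_words text out) := by unfold Spec_length_of_words; infer_instance

-- ===== CLAIM (what is proved, stated in full; the proofs are below) =====
def Claim_equal_length_of_words : Prop := ∀ (text : String), Dom_length_of_words text → Spec_length_of_words text (length_of_words text)

-- ===== LEMMAS AND PROOFS =====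

theorem pv_foldl_concat_map {α β : Type} (f : α → β) :
    ∀ (ws : List α) (acc : List β), ws.foldl (fun a i => a ++ [f i]) acc = acc ++ ws.map f
  | [], acc => by simp
  | w :: ws, acc => by
      simp only [List.foldl_cons, List.map_cons, pv_foldl_concat_map f ws]
      simp

theorem pv_innerA : ∀ (l : List Char) (n : Int) (s : String),
    l.foldl (fun (st : Int × String) _ => (st.1 + 1, PySem.Int.toStr (st.1 + 1))) (n, s)
      = (n + l.length, if l.isEmpty then s else PySem.Int.toStr (n + l.length))
  | [], n, s => by simp
  | c :: l, n, s => by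
      rw [List.foldl_cons, pv_innerA l (n + 1)]
      have h : n + 1 + (l.length : Int) = n + ((c :: l).length : Int) := by push_cast [List.length_cons]; ring
      by_cases hl : l.isEmpty
      · rcases l with _ | ⟨d, l⟩
        · simp
        · simp at hl
      · simp [hl, h]

theorem pv_go_append : ∀ (cs cur : List Char) (acc : List (List Char)),
    PySem.Chars.split₀.go cs cur acc = acc.reverse ++ PySem.Chars.split₀.go cs cur []
  | [], cur, acc => by
      simp only [PySem.Chars.split₀.go]
      split_ifs <;> simp
  | c :: cs, cur, acc => by
      simp only [PySem.Chars.split₀.go]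
      split_ifs with h1 h2
      · exact pv_go_append cs [] acc
      · rw [pv_go_append cs [] (cur.reverse :: acc), pv_go_append cs [] [cur.reverse]]
        simp
      · exact pv_go_append cs (c :: cur) acc

theorem pv_go_ne_nil : ∀ (cs cur : List Char) (acc : List (List Char)),
    (∀ w ∈ acc, w ≠ []) → ∀ w ∈ PySem.Chars.split₀.go cs cur acc, w ≠ []
  | [], cur, acc, h => by
      simp only [PySem.Chars.split₀.go]
      split_ifs with hc
      · intro w hw
        exact h w (by simpa using hw)
      · intro w hw
        have hw' : w ∈ acc ∨ w = cur.reverse := by simpa using hw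
        rcases hw' with hw' | hw'
        · exact h w hw'
        · subst hw'
          intro h'
          exact hc (by simp [List.reverse_eq_nil_iff.mp h'])
  | c :: cs, cur, acc, h => by
      simp only [PySem.Chars.split₀.go]
      split_ifs with h1 h2
      · exact pv_go_ne_nil cs [] acc h
      · refine pv_go_ne_nil cs [] (cur.reverse :: acc) ?_
        intro w hw
        rcases List.mem_cons.mp hw with hw' | hw'
        · subst hw'
          intro h'
          exact h2 (by simp [List.reverse_eq_nil_iff.mp h'])
        · exact h w hw'
      · exact pv_go_ne_nil cs (c :: cur) acc h

theorem pv_scanB : ∀ (cs cur : List Char) (acc : List String),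
    (let st := cs.foldl (fun (st : List String × Int) ch =>
        if PySem.Chars.isspace ch then
          (if st.2 > 0 then st.1 ++ [PySem.Int.toStr st.2] else st.1, 0)
        else
          (st.1, st.2 + 1)) (acc, (cur.length : Int));
      if st.2 > 0 then st.1 ++ [PySem.Int.toStr st.2] else st.1)
      = acc ++ (PySem.Chars.split₀.go cs cur []).map (fun w => PySem.Int.toStr (w.length : Int))
  | [], cur, acc => by
      rcases cur with _ | ⟨c, cur⟩
      · simp [PySem.Chars.split₀.go]
      · simp only [List.foldl_nil, PySem.Chars.split₀.go]
        simp
  | c :: cs, cur, acc => by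
      simp only [List.foldl_cons]
      by_cases hsp : PySem.Chars.isspace c = true
      · rcases cur with _ | ⟨d, cur⟩
        · simpa [hsp, PySem.Chars.split₀.go] using pv_scanB cs [] acc
        · have hpos : (0 : Int) < ((d :: cur).length : Int) := by
            exact_mod_cast Nat.succ_pos cur.length
          have IH := pv_scanB cs [] (acc ++ [PySem.Int.toStr ((d :: cur).length : Int)])
          simp only [hsp, if_true, PySem.Chars.split₀.go, List.isEmpty_cons,
            Bool.false_eq_true, if_false]
          rw [pv_go_append cs [] [(d :: cur).reverse]]
          simp only [List.reverse_cons, List.reverse_nil, List.nil_append, List.map_append,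
            List.map_cons, List.map_nil, List.length_reverse, List.length_append,
            List.length_cons]
          rw [← List.append_assoc]
          simpa [hpos] using IH
      · have IH := pv_scanB cs (c :: cur) acc
        have hlen : (cur.length : Int) + 1 = ((c :: cur).length : Int) := by
          push_cast [List.length_cons]; ring
        simp only [PySem.Chars.split₀.go]
        conv_rhs => rw [if_neg hsp]
        simp only [hsp, Bool.false_eq_true, if_false, hlen]
        exact IH

-- ===== VERDICT (by name: the statement is the Claim_ definition above) =====
theorem length_of_words_spec : Claim_equal_length_of_words := by
  intro text _
  show length_of_words text = length_of_words_alt text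
  have hA : length_of_words text
      = PySem.Str.join " " ((PySem.Chars.split₀ text.toList).map
          (fun w => if w.isEmpty then "" else PySem.Int.toStr (w.length : Int))) := by
    simp only [length_of_words, PySem.Str.split₀, pv_foldl_concat_map, List.nil_append,
      List.map_map]
    congr 1
    refine List.map_congr_left ?_
    intro w _
    simp [pv_innerA w 0 "", String.toList_ofList]
  have hB : length_of_words_alt text
      = PySem.Str.join " " ((PySem.Chars.split₀ text.toList).map
          (fun w => PySem.Int.toStr (w.length : Int))) := by
    have := pv_scanB text.toList [] []
    simp only [List.length_nil, Nat.cast_zero] at this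
    simp only [length_of_words_alt, PySem.Chars.split₀]
    rw [this]
    simp
  rw [hA, hB]
  congr 1
  refine List.map_congr_left ?_
  intro w hw
  have hne : w ≠ [] := pv_go_ne_nil text.toList [] [] (by simp) w hw
  simp [hne]
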